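-- pv_equiv track=rewrite | github.com/theElusiveJoe/BMSTU-IU9 | Formal Language Theory/lab2_regex_infixes/tools/alt_splitter.py | get_split_indexes
-- ===== SOURCE A (Python) =====
-- def get_split_indexes(raw_string):
--     outside_brackets = 0
--     alt_sign_indexes = []
--     for i, cur_char in enumerate(raw_string):
--         if cur_char == '|' and outside_brackets == 0:
--             alt_sign_indexes.append(i)
--         elif cur_char == '(':
--             outside_brackets += 1
--         elif cur_char == ')':
--             outside_brackets -= 1
--     return alt_sign_indexes
-- ===== SOURCE B (Python) =====
-- def get_split_indexes(raw_string):
--     # Pass 1: depth table (nesting level seen *before* each character).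
--     depth = []
--     d = 0
--     for c in raw_string:
--         depth.append(d)
--         if c == '(':
--             d += 1
--         elif c == ')':
--             d -= 1
--     # Pass 2: collect indices of top-level bars.
--     return [i for i in range(len(raw_string))
--             if raw_string[i] == '|' and depth[i] == 0]
-- ===== Notes on version B (the rewrite author's own statement) =====
-- stated objective: alternative
-- what changed: Replaces the single stateful enumerate loop by a two-pass decomposition: first a prefix-sum pass builds a depth table, then a separate comprehension over indices filters the top-level bars.
import Mathlib
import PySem

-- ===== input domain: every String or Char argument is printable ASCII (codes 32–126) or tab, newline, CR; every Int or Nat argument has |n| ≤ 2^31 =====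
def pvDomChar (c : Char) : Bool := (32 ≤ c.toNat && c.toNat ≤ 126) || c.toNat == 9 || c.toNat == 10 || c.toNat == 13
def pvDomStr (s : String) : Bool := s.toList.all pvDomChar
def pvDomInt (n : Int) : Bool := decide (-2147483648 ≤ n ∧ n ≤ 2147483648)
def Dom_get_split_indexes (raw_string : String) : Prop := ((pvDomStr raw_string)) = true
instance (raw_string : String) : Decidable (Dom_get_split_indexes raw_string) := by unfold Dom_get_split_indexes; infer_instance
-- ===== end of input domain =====

-- B replaces A's single stateful scan by a two-pass decomposition (prefix-sum depth
-- table, then an index-filtering comprehension); objective: alternative, same O(n) cost.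

-- ===== PORT A =====
-- literal port of A: one enumerate loop carrying (outside_brackets, alt_sign_indexes)
def get_split_indexes (raw_string : String) : List Int :=
  ((PySem.List.enumerate raw_string.toList 0).foldl
    (fun (st : Int × List Int) p =>
      if p.2 = '|' ∧ st.1 = 0 then (st.1, st.2 ++ [p.1])
      else if p.2 = '(' then (st.1 + 1, st.2)
      else if p.2 = ')' then (st.1 - 1, st.2)
      else st) ((0 : Int), ([] : List Int))).2

-- ===== PORT B =====
-- literal port of B: pass 1 builds the depth table, pass 2 filters indices over range(len)
def get_split_indexes_alt (raw_string : String) : List Int :=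
  let cs := raw_string.toList
  let build := cs.foldl
    (fun (st : Int × List Int) c =>
      let ds := st.2 ++ [st.1]
      if c = '(' then (st.1 + 1, ds)
      else if c = ')' then (st.1 - 1, ds)
      else (st.1, ds)) ((0 : Int), ([] : List Int))
  let depth := build.2
  (List.range cs.length).filterMap (fun i =>
    if cs[i]! = '|' ∧ depth[i]! = 0 then some ((i : Nat) : Int) else none)

-- ===== PRECONDITION & SPEC =====
def Spec_get_split_indexes (raw_string : String) (out : List Int) : Prop := out = get_split_indexes_alt raw_string
instance (raw_string : String) (out : List Int) : Decidable (Spec_get_split_indexes raw_string out) := by unfold Spec_get_split_indexes; infer_instance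

-- ===== CLAIM =====
def Claim_equal_get_split_indexes : Prop := ∀ (raw_string : String), Dom_get_split_indexes raw_string → Spec_get_split_indexes raw_string (get_split_indexes raw_string)

-- ===== LEMMAS AND PROOFS =====

-- reference recursion: top-level bar indices of cs at depth d, indices starting at i
def pvGo (cs : List Char) (d : Int) (i : Int) : List Int :=
  match cs with
  | [] => []
  | c :: r =>
    if c = '|' ∧ d = 0 then i :: pvGo r d (i + 1)
    else if c = '(' then pvGo r (d + 1) (i + 1)
    else if c = ')' then pvGo r (d - 1) (i + 1)
    else pvGo r d (i + 1)

-- reference depth table starting at depth d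
def pvDepths (cs : List Char) (d : Int) : List Int :=
  match cs with
  | [] => []
  | c :: r => d :: pvDepths r (if c = '(' then d + 1 else if c = ')' then d - 1 else d)

theorem pvGo_shift (cs : List Char) (d i : Int) :
    pvGo cs d i = (pvGo cs d 0).map (fun x => x + i) := by
  induction cs generalizing d i with
  | nil => simp [pvGo]
  | cons c r ih =>
    have key : ∀ dd : Int, pvGo r dd (i + 1) = (pvGo r dd 1).map (fun x => x + i) := by
      intro dd
      rw [ih dd (i + 1), ih dd 1, List.map_map]
      refine List.map_congr_left ?_
      intro a _
      simp only [Function.comp]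
      omega
    by_cases hb : c = '|' ∧ d = 0
    · simp [pvGo, hb, key]
    · by_cases ho : c = '('
      · simp [pvGo, hb, ho, key]
      · by_cases hc : c = ')'
        · simp [pvGo, hb, ho, hc, key]
        · simp [pvGo, hb, ho, hc, key]

theorem portA_go (cs : List Char) (d : Int) (acc : List Int) (i : Int) :
    ((PySem.List.enumerate cs i).foldl
      (fun (st : Int × List Int) p =>
        if p.2 = '|' ∧ st.1 = 0 then (st.1, st.2 ++ [p.1])
        else if p.2 = '(' then (st.1 + 1, st.2)
        else if p.2 = ')' then (st.1 - 1, st.2)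
        else st) (d, acc)).2 = acc ++ pvGo cs d i := by
  induction cs generalizing d acc i with
  | nil => simp [PySem.List.enumerate_nil, pvGo]
  | cons c r ih =>
    rw [PySem.List.enumerate_cons]
    by_cases hb : c = '|' ∧ d = 0
    · simp [List.foldl_cons, hb, ih, pvGo]
    · by_cases ho : c = '('
      · simp [List.foldl_cons, hb, ho, ih, pvGo]
      · by_cases hc : c = ')'
        · simp [List.foldl_cons, hb, ho, hc, ih, pvGo]
        · simp [List.foldl_cons, hb, ho, hc, ih, pvGo]

theorem portB_depths (cs : List Char) (d : Int) (acc : List Int) :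
    (cs.foldl
      (fun (st : Int × List Int) c =>
        let ds := st.2 ++ [st.1]
        if c = '(' then (st.1 + 1, ds)
        else if c = ')' then (st.1 - 1, ds)
        else (st.1, ds)) (d, acc)).2 = acc ++ pvDepths cs d := by
  induction cs generalizing d acc with
  | nil => simp [pvDepths]
  | cons c r ih =>
    by_cases ho : c = '('
    · simp [List.foldl_cons, ho, ih, pvDepths]
    · by_cases hc : c = ')'
      · simp [List.foldl_cons, ho, hc, ih, pvDepths]
      · simp [List.foldl_cons, ho, hc, ih, pvDepths]

theorem portB_filter (cs : List Char) (d : Int) :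
    (List.range cs.length).filterMap (fun i =>
      if cs[i]! = '|' ∧ (pvDepths cs d)[i]! = 0 then some ((i : Nat) : Int) else none)
      = pvGo cs d 0 := by
  induction cs generalizing d with
  | nil => simp [pvGo]
  | cons c r ih =>
    have hd' : pvDepths (c :: r) d =
        d :: pvDepths r (if c = '(' then d + 1 else if c = ')' then d - 1 else d) := rfl
    set d' := (if c = '(' then d + 1 else if c = ')' then d - 1 else d) with hdd
    rw [List.length_cons, List.range_succ_eq_map, List.filterMap_cons, List.filterMap_map]
    have htail : (List.range r.length).filterMap
        ((fun i => if (c :: r)[i]! = '|' ∧ (pvDepths (c :: r) d)[i]! = 0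
            then some ((i : Nat) : Int) else none) ∘ Nat.succ)
        = (pvGo r d' 0).map (fun x => x + 1) := by
      rw [← ih d', List.map_filterMap]
      apply List.filterMap_congr
      intro i _
      simp only [Function.comp, hd', List.getElem!_cons_succ]
      split
      · simp [add_comm]
      · rfl
    rw [htail]
    by_cases hb : c = '|' ∧ d = 0
    · obtain ⟨h1, h2⟩ := hb
      subst h1; subst h2
      have hdd0 : d' = 0 := by rw [hdd]; decide
      simp only [hd', List.getElem!_cons_zero, and_self, if_pos, hdd0]
      simp [pvGo, pvGo_shift r 0 1]
    · have hf0 : (if (c :: r)[0]! = '|' ∧ (pvDepths (c :: r) d)[0]! = 0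
          then some ((0 : Nat) : Int) else none) = none := by
        simp only [hd', List.getElem!_cons_zero]
        simp [hb]
      rw [hf0]
      by_cases ho : c = '('
      · have : d' = d + 1 := by simp [hdd, ho]
        simp [pvGo, hb, ho, this, pvGo_shift r (d + 1) 1]
      · by_cases hc : c = ')'
        · have : d' = d - 1 := by simp [hdd, ho, hc]
          simp [pvGo, hb, ho, hc, this, pvGo_shift r (d - 1) 1]
        · have : d' = d := by simp [hdd, ho, hc]
          simp [pvGo, hb, ho, hc, this, pvGo_shift r d 1]

-- ===== VERDICT =====
theorem get_split_indexes_spec : Claim_equal_get_split_indexes := by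
  intro s _
  unfold Spec_get_split_indexes get_split_indexes get_split_indexes_alt
  rw [portA_go]
  simp only [portB_depths, List.nil_append]
  exact (portB_filter s.toList 0).symm
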